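-- pv_equiv track=rewrite | github.com/Qasim-Gill/Advent-of-Code | 2024/Day 7/first/run.py | find_valid_expressions
-- ===== SOURCE A (Python) =====
-- from itertools import product
--
-- def calculate_expression(numbers, operators):
--     """Calculates the result of an expression with given numbers and operators."""
--     result = numbers[0]
--     for i in range(len(operators)):
--         if operators[i] == '+':
--             result += numbers[i + 1]
--         elif operators[i] == '*':
--             result *= numbers[i + 1]
--     return result
--
-- def find_valid_expressions(equations):
--     """Determines which equations can be solved with + or * operators."""
--     total_calibration = 0
--     for target_value, numbers in equations:
--         num_positions = len(numbers) - 1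
--         for operator_combo in product(['+', '*'], repeat=num_positions):
--             result = calculate_expression(numbers, operator_combo)
--             if result == target_value:
--                 total_calibration += target_value
--                 break
--     return total_calibration
-- ===== SOURCE B (Python) =====
-- def find_valid_expressions(equations):
--     """Determines which equations can be solved with + or * operators."""
--     total_calibration = 0
--     for target_value, numbers in equations:
--         vals = {numbers[0]}
--         for x in numbers[1:]:
--             vals = {r for v in vals for r in (v + x, v * x)}
--         if target_value in vals:
--             total_calibration += target_value
--     return total_calibration
-- ===== Notes on version B (the rewrite author's own statement) =====
-- stated objective: faster
-- what changed: Instead of enumerating all 2^(n-1) operator tuples and re-evaluating each expression from scratch, B maintains the set of values reachable over the prefix of the number list in one left-to-right pass and checks membership of the target.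
import Mathlib
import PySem

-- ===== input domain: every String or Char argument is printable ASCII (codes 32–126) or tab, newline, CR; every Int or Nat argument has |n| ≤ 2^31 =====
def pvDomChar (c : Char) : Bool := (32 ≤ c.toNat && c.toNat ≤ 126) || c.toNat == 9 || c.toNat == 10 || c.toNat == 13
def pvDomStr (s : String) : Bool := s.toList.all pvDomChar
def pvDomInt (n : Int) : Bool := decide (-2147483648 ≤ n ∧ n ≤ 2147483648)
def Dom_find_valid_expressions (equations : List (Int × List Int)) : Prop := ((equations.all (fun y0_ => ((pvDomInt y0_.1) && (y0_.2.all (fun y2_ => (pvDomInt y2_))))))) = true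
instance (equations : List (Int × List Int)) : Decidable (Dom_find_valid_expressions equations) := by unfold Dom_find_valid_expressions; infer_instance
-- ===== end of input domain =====

-- B replaces A's enumeration of all operator tuples by an incremental set of values
-- reachable over the prefix of the number list (objective: faster).


-- ===== PORT A =====
-- itertools.product(['+','*'], repeat=n), in product order (first coordinate varies slowest)
def pvCombos : Nat → List (List Char)
  | 0 => [[]]
  | n + 1 => ['+', '*'].flatMap (fun o => (pvCombos n).map (fun c => o :: c))

-- calculate_expression: result = numbers[0]; for i: result (op_i) numbers[i+1]
-- (the index loop pairing operators[i] with numbers[i+1] is the zip with numbers[1:];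
--  numbers[0] on the empty list raises in Python — excluded by Pre_)
def calculate_expression (numbers : List Int) (operators : List Char) : Int :=
  (operators.zip (numbers.drop 1)).foldl
    (fun result p => if p.1 = '+' then result + p.2
                     else if p.1 = '*' then result * p.2 else result)
    numbers.headI

-- the inner 'for … break' adds target_value once iff some combo evaluates to it
def find_valid_expressions (equations : List (Int × List Int)) : Int :=
  equations.foldl
    (fun total_calibration eq =>
      let numbers := eq.2
      if (pvCombos (numbers.length - 1)).any
           (fun ops => calculate_expression numbers ops == eq.1)
      then total_calibration + eq.1 else total_calibration)
    0

-- ===== PORT B =====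
-- one step: {r for v in vals for r in (v + x, v * x)}
def pvReachStep (vals : PySem.Set Int) (x : Int) : PySem.Set Int :=
  PySem.Set.ofList (vals.flatMap (fun v => [v + x, v * x]))

def find_valid_expressions_alt (equations : List (Int × List Int)) : Int :=
  equations.foldl
    (fun total_calibration eq =>
      let vals := (eq.2.drop 1).foldl pvReachStep (PySem.Set.ofList [eq.2.headI])
      if PySem.Set.contains vals eq.1
      then total_calibration + eq.1 else total_calibration)
    0

-- ===== PRECONDITION & SPEC =====
-- Pre_ excludes equations with an empty number list: there A raises ValueError
-- (product(repeat=-1)) and B raises IndexError (numbers[0]).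
def Pre_find_valid_expressions (equations : List (Int × List Int)) : Prop :=
  ∀ eq ∈ equations, eq.2 ≠ []
instance (equations : List (Int × List Int)) : Decidable (Pre_find_valid_expressions equations) := by unfold Pre_find_valid_expressions; infer_instance

def pvWitness_find_valid_expressions : (List (Int × List Int)) :=
  [(6, [2, 3]), (7, [1, 2, 3]), (5, [1, 1])]

def Spec_find_valid_expressions (equations : List (Int × List Int)) (out : Int) : Prop := out = find_valid_expressions_alt equations
instance (equations : List (Int × List Int)) (out : Int) : Decidable (Spec_find_valid_expressions equations out) := by unfold Spec_find_valid_expressions; infer_instance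

-- ===== CLAIM (what is proved, stated in full; the proofs are below) =====
def Claim_equal_find_valid_expressions : Prop := ∀ (equations : List (Int × List Int)), Dom_find_valid_expressions equations → Pre_find_valid_expressions equations → Spec_find_valid_expressions equations (find_valid_expressions equations)

-- ===== LEMMAS AND PROOFS =====

-- reachable-set invariant: t is in the folded set iff some start value in S
-- together with some operator tuple over rest evaluates to t
theorem pvReach_mem (rest : List Int) (S : PySem.Set Int) (t : Int) :
    t ∈ rest.foldl pvReachStep S ↔
      ∃ a ∈ S, ∃ ops ∈ pvCombos rest.length,
        (ops.zip rest).foldl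
          (fun result p => if p.1 = '+' then result + p.2
                           else if p.1 = '*' then result * p.2 else result) a = t := by
  induction rest generalizing S with
  | nil =>
      simp [pvCombos]
  | cons x r ih =>
      rw [List.foldl_cons, ih]
      constructor
      · rintro ⟨b, hb, ops, hops, hfold⟩
        rw [pvReachStep, PySem.Set.mem_ofList, List.mem_flatMap] at hb
        obtain ⟨a, ha, hba⟩ := hb
        simp only [List.mem_cons, List.not_mem_nil, or_false] at hba
        rcases hba with h | h
        · exact ⟨a, ha, '+' :: ops, by
            simp only [List.length_cons, pvCombos, List.mem_flatMap]
            exact ⟨'+', by simp, List.mem_map.mpr ⟨ops, hops, rfl⟩⟩,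
            by simpa [h] using hfold⟩
        · exact ⟨a, ha, '*' :: ops, by
            simp only [List.length_cons, pvCombos, List.mem_flatMap]
            exact ⟨'*', by simp, List.mem_map.mpr ⟨ops, hops, rfl⟩⟩,
            by simpa [h] using hfold⟩
      · rintro ⟨a, ha, ops, hops, hfold⟩
        simp only [List.length_cons, pvCombos, List.mem_flatMap, List.mem_map] at hops
        obtain ⟨o, ho, c, hc, rfl⟩ := hops
        have hmem : ∀ b, b = a + x ∨ b = a * x →
            b ∈ pvReachStep S x := by
          intro b hb
          rw [pvReachStep, PySem.Set.mem_ofList, List.mem_flatMap]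
          exact ⟨a, ha, by rcases hb with h | h <;> simp [h]⟩
        simp only [List.mem_cons, List.not_mem_nil, or_false] at ho
        rcases ho with rfl | rfl
        · exact ⟨a + x, hmem _ (Or.inl rfl), c, hc, by simpa using hfold⟩
        · exact ⟨a * x, hmem _ (Or.inr rfl), c, hc, by simpa using hfold⟩

-- per-equation: A's "some combo hits the target" equals B's membership test
theorem pvStep_eq (t : Int) (numbers : List Int) (h : numbers ≠ []) :
    (pvCombos (numbers.length - 1)).any
      (fun ops => calculate_expression numbers ops == t)
    = PySem.Set.contains
        ((numbers.drop 1).foldl pvReachStep (PySem.Set.ofList [numbers.headI])) t := by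
  obtain ⟨a, rest, rfl⟩ := List.exists_cons_of_ne_nil h
  rw [Bool.eq_iff_iff, List.any_eq_true, PySem.Set.contains_iff, pvReach_mem]
  simp only [calculate_expression, beq_iff_eq]
  constructor
  · rintro ⟨ops, hops, hfold⟩
    exact ⟨a, by simp [PySem.Set.mem_ofList], ops, by simpa using hops, hfold⟩
  · rintro ⟨b, hb, ops, hops, hfold⟩
    rw [PySem.Set.mem_ofList] at hb
    simp only [List.mem_singleton] at hb
    subst hb
    exact ⟨ops, by simpa using hops, hfold⟩

-- ===== VERDICT (by name: the statement is the Claim_ definition above) =====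
theorem find_valid_expressions_spec : Claim_equal_find_valid_expressions := by
  intro equations _ hpre
  unfold Spec_find_valid_expressions find_valid_expressions find_valid_expressions_alt
  apply PySem.List.foldl_congr_mem
  intro acc eq heq
  simp only [pvStep_eq eq.1 eq.2 (hpre eq heq)]
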